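-- pv_equiv track=rewrite | github.com/mattesko/CompositionalNets | Initialization_Code/config_initialization.py | calculate_receptive_fields
-- ===== SOURCE A (Python) =====
-- from functools import reduce
--
-- def calculate_receptive_fields(kernel_sizes, strides):
--
--     r_fields = []
--     prev_r_field = 1
--
--     for i, kernel_size in enumerate(kernel_sizes, start=1):
--         product_of_strides = reduce(lambda x,y: x*y, strides[:i])
--
--         curr_r_field = prev_r_field + (kernel_size - 1) * product_of_strides
--         r_fields.append(curr_r_field)
--         prev_r_field = curr_r_field
--
--     return r_fields
-- ===== SOURCE B (Python) =====
-- def calculate_receptive_fields(kernel_sizes, strides):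
--     # One pass: maintain the running product of strides incrementally (O(n) vs A's O(n^2)).
--     r_fields = []
--     r = 1
--     p = 1
--     for i, k in enumerate(kernel_sizes):
--         if i < len(strides):
--             p *= strides[i]
--         r += (k - 1) * p
--         r_fields.append(r)
--     return r_fields
-- ===== Notes on version B (the rewrite author's own statement) =====
-- stated objective: faster
-- what changed: B keeps a running product of strides updated once per layer instead of re-reducing the prefix strides[:i] from scratch at every layer.
-- outside the precondition, e.g. on calculate_receptive_fields([3], []): A raises TypeError, B returns [3]
import Mathlib
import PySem

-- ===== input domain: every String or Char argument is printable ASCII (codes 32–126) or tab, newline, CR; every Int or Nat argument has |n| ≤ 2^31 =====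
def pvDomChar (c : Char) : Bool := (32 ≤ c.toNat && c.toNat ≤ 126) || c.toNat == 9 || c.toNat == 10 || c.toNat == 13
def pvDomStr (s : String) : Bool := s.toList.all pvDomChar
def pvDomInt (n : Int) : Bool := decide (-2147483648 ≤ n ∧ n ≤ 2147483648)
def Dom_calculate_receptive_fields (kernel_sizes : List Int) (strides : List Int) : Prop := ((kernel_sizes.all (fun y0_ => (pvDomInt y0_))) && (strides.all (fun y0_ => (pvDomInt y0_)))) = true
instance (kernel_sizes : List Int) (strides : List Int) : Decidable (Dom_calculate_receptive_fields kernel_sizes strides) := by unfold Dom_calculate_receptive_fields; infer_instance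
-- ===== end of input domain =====

-- One honest line: B replaces A's per-layer reduce over strides[:i] with a running product
-- maintained in a single pass (faster, asymptotic); return values agree on all of Pre_.

-- ===== PORT A =====
-- reduce(lambda x,y: x*y, l); the empty case is Python's TypeError, excluded by Pre_ (0 is a dummy)
def pyReduceMul : List Int → Int
  | [] => 0
  | x :: xs => xs.foldl (· * ·) x

-- the 'for i, kernel_size in enumerate(kernel_sizes, start=1)' loop; state: prev_r_field
def calcA_go (strides : List Int) : List Int → Nat → Int → List Int
  | [], _, _ => []
  | k :: ks, i, prev =>
    let product_of_strides := pyReduceMul (PySem.List.slice strides none (some (i : Int)))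
    let curr := prev + (k - 1) * product_of_strides
    curr :: calcA_go strides ks (i + 1) curr

def calculate_receptive_fields (kernel_sizes : List Int) (strides : List Int) : List Int :=
  calcA_go strides kernel_sizes 1 1

-- ===== PORT B =====
-- one pass; state: (running receptive field r, running stride product p), index i from 0
def calcB_go (strides : List Int) : List Int → Nat → Int → Int → List Int
  | [], _, _, _ => []
  | k :: ks, i, r, p =>
    let p' := if i < strides.length then p * strides.getD i 0 else p
    let r' := r + (k - 1) * p'
    r' :: calcB_go strides ks (i + 1) r' p'

def calculate_receptive_fields_alt (kernel_sizes : List Int) (strides : List Int) : List Int :=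
  calcB_go strides kernel_sizes 0 1 1

-- ===== PRECONDITION & SPEC =====
-- Pre_ excludes exactly the inputs where A raises: non-empty kernel_sizes with empty strides
-- (reduce over the empty slice strides[:i] is a TypeError).
def Pre_calculate_receptive_fields (kernel_sizes : List Int) (strides : List Int) : Prop :=
  kernel_sizes = [] ∨ strides ≠ []
instance (kernel_sizes : List Int) (strides : List Int) : Decidable (Pre_calculate_receptive_fields kernel_sizes strides) := by unfold Pre_calculate_receptive_fields; infer_instance

def pvWitness_calculate_receptive_fields : List Int × List Int := ([3, 3, 5], [1, 2, 2])

def Spec_calculate_receptive_fields (kernel_sizes : List Int) (strides : List Int) (out : List Int) : Prop := out = calculate_receptive_fields_alt kernel_sizes strides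
instance (kernel_sizes : List Int) (strides : List Int) (out : List Int) : Decidable (Spec_calculate_receptive_fields kernel_sizes strides out) := by unfold Spec_calculate_receptive_fields; infer_instance

-- ===== CLAIM =====
def Claim_equal_calculate_receptive_fields : Prop := ∀ (kernel_sizes : List Int) (strides : List Int), Dom_calculate_receptive_fields kernel_sizes strides → Pre_calculate_receptive_fields kernel_sizes strides → Spec_calculate_receptive_fields kernel_sizes strides (calculate_receptive_fields kernel_sizes strides)

-- ===== LEMMAS AND PROOFS =====

-- foldl (·*·) seeded at x is x times the product
theorem foldl_mul_eq (xs : List Int) (x : Int) : xs.foldl (· * ·) x = x * xs.prod := by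
  induction xs generalizing x with
  | nil => simp
  | cons y ys ih => simp [List.foldl_cons, ih (x * y), List.prod_cons, mul_assoc]

-- reduce over a non-empty list is its product
theorem pyReduceMul_eq_prod (l : List Int) (h : l ≠ []) : pyReduceMul l = l.prod := by
  cases l with
  | nil => exact absurd rfl h
  | cons x xs => simp [pyReduceMul, foldl_mul_eq, List.prod_cons]

-- the running-product step: prod of take (i+1) from prod of take i
theorem prod_take_succ (ss : List Int) (i : Nat) :
    (ss.take (i + 1)).prod =
      (if i < ss.length then (ss.take i).prod * ss.getD i 0 else (ss.take i).prod) := by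
  split_ifs with h
  · rw [List.prod_take_succ ss i h]
    simp [List.getD, List.getElem?_eq_getElem h]
  · rw [List.take_of_length_le (by omega), List.take_of_length_le (by omega)]

-- main loop invariant: A's loop at enumerate index i+1 equals B's loop at index i
-- carrying p = (ss.take i).prod, for non-empty ss
theorem go_eq (ss : List Int) (hss : ss ≠ []) :
    ∀ (ks : List Int) (i : Nat) (r : Int),
      calcA_go ss ks (i + 1) r = calcB_go ss ks i r (ss.take i).prod := by
  intro ks
  induction ks with
  | nil => intro i r; rfl
  | cons k ks ih =>
    intro i r
    have hslice : PySem.List.slice ss none (some ((i : Int) + 1)) = ss.take (i + 1) := by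
      have := PySem.List.slice_to_natCast ss (i + 1)
      simpa using this
    have hred : pyReduceMul (PySem.List.slice ss none (some ((i : Int) + 1)))
        = (ss.take (i + 1)).prod := by
      rw [hslice, pyReduceMul_eq_prod]
      intro h
      have : ss = [] := by
        cases ss with
        | nil => rfl
        | cons a as => simp [List.take] at h
      exact hss this
    simp only [calcA_go, calcB_go]
    rw [show ((i : Int) + 1) = (((i + 1 : Nat) : Int)) by push_cast; ring] at *
    rw [hred, ← prod_take_succ, ih (i + 1)]

-- ===== VERDICT =====
theorem calculate_receptive_fields_spec : Claim_equal_calculate_receptive_fields := by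
  intro ks ss _ hpre
  unfold Spec_calculate_receptive_fields calculate_receptive_fields calculate_receptive_fields_alt
  rcases hpre with h | h
  · subst h; rfl
  · have := go_eq ss h ks 0 1
    simpa using this
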